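-- pv_equiv track=rewrite | github.com/scott009/InquiryCircle | add_language_keys.py | add_text_keys
-- ===== SOURCE A (Python) =====
-- from collections import OrderedDict
--
-- TEXT_KEYS = [
--     "thai_text",
--     "vietnamese_text",
--     "korean_text",
--     "japanese_text",
--     "Chinese_Tradition_text",
--     "Chinese_Simplified_text"
-- ]
--
-- def add_text_keys(paragraph):
--     """Add language text keys to a paragraph in the correct order."""
--     if "text" not in paragraph:
--         return paragraph
--
--     # Create new ordered dict with keys in correct order
--     new_para = OrderedDict()
--
--     # Add all existing keys first, except language text keys
--     for key, value in paragraph.items():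
--         if key not in TEXT_KEYS:
--             new_para[key] = value
--
--     # Add language text keys in correct order after "text"
--     keys_list = list(new_para.keys())
--     if "text" in keys_list:
--         text_index = keys_list.index("text") + 1
--
--         # Insert language text keys
--         for lang_key in TEXT_KEYS:
--             # Preserve existing value or set to empty string
--             new_para[lang_key] = paragraph.get(lang_key, "")
--
--         # Now rebuild with correct order
--         final_para = OrderedDict()
--         for i, key in enumerate(keys_list):
--             final_para[key] = new_para[key]
--             # Insert language keys after "text"
--             if key == "text":
--                 for lang_key in TEXT_KEYS:
--                     final_para[lang_key] = new_para[lang_key]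
--
--         # Add any remaining keys
--         for key in new_para:
--             if key not in final_para and key not in keys_list:
--                 final_para[key] = new_para[key]
--
--         return final_para
--
--     return new_para
-- ===== SOURCE B (Python) =====
-- from collections import OrderedDict
--
-- TEXT_KEYS = [
--     "thai_text",
--     "vietnamese_text",
--     "korean_text",
--     "japanese_text",
--     "Chinese_Tradition_text",
--     "Chinese_Simplified_text"
-- ]
--
-- def add_text_keys(paragraph):
--     """Add language text keys to a paragraph in the correct order."""
--     if "text" not in paragraph:
--         return paragraph
--     result = OrderedDict()
--     for key, value in paragraph.items():
--         if key in TEXT_KEYS: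
--             continue
--         result[key] = value
--         if key == "text":
--             for lang_key in TEXT_KEYS:
--                 result[lang_key] = paragraph.get(lang_key, "")
--     return result
-- ===== Notes on version B (the rewrite author's own statement) =====
-- stated objective: simpler
-- what changed: B replaces A's three sequential passes (filtered OrderedDict copy, index lookup, rebuild-with-reinsertion pass plus a leftover-keys sweep) with a single pass over paragraph.items() that skips language keys and emits the six language entries immediately after assigning 'text'.
import Mathlib
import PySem

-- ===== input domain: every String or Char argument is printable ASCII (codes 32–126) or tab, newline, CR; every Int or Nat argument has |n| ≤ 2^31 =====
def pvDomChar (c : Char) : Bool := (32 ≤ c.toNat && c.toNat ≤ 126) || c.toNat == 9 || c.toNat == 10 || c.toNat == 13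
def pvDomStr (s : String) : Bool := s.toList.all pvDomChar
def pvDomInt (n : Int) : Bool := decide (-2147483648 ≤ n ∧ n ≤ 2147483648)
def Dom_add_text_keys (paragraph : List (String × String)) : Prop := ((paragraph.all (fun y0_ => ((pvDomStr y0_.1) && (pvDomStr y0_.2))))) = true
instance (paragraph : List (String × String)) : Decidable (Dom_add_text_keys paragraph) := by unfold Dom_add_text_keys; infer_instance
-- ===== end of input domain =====

-- B replaces A's three passes (filtered copy, index pass, rebuild-with-insertion pass) by one
-- interleaved pass that skips language keys and emits them right after "text"; objective: simpler.

def TEXT_KEYS : List String :=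
  ["thai_text", "vietnamese_text", "korean_text", "japanese_text",
   "Chinese_Tradition_text", "Chinese_Simplified_text"]

-- ===== PORT A =====
-- literal port of A; the dead variable `text_index` (computed, never used) is omitted.
def add_text_keys (paragraph : List (String × String)) : List (String × String) :=
  if !(paragraph.map Prod.fst).contains "text" then paragraph
  else
    let new_para : PySem.Dict String String :=
      paragraph.foldl (fun d kv => if TEXT_KEYS.contains kv.1 then d else d.insert kv.1 kv.2)
        PySem.Dict.empty
    let keys_list := new_para.keys
    if keys_list.contains "text" then
      let new_para2 :=
        TEXT_KEYS.foldl (fun d lk => d.insert lk ((PySem.Dict.mk paragraph).getD lk "")) new_para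
      let final0 : PySem.Dict String String :=
        keys_list.foldl (fun f k =>
          let f1 := f.insert k (new_para2.getD k "")
          if k = "text" then
            TEXT_KEYS.foldl (fun f2 lk => f2.insert lk (new_para2.getD lk "")) f1
          else f1) PySem.Dict.empty
      let final1 :=
        new_para2.keys.foldl (fun f k =>
          if !f.contains k && !keys_list.contains k then f.insert k (new_para2.getD k "") else f)
          final0
      final1.items
    else new_para.items

-- ===== PORT B =====
def add_text_keys_alt (paragraph : List (String × String)) : List (String × String) :=
  if !(paragraph.map Prod.fst).contains "text" then paragraph
  else
    (paragraph.foldl (fun r kv =>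
        if TEXT_KEYS.contains kv.1 then r
        else
          let r1 := r.insert kv.1 kv.2
          if kv.1 = "text" then
            TEXT_KEYS.foldl (fun r2 lk => r2.insert lk ((PySem.Dict.mk paragraph).getD lk "")) r1
          else r1)
      (PySem.Dict.empty : PySem.Dict String String)).items

-- ===== PRECONDITION & SPEC =====
-- Pre_ excludes association lists with duplicate keys: a Python dict cannot contain them,
-- so they do not represent any input the Python programs can receive.
def Pre_add_text_keys (paragraph : List (String × String)) : Prop :=
  (paragraph.map Prod.fst).Nodup

instance (paragraph : List (String × String)) : Decidable (Pre_add_text_keys paragraph) := by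
  unfold Pre_add_text_keys; infer_instance

def pvWitness_add_text_keys : (List (String × String)) := [("text", "hello"), ("id", "7")]

def Spec_add_text_keys (paragraph : List (String × String)) (out : List (String × String)) : Prop :=
  out = add_text_keys_alt paragraph

instance (paragraph : List (String × String)) (out : List (String × String)) :
    Decidable (Spec_add_text_keys paragraph out) := by unfold Spec_add_text_keys; infer_instance

-- ===== CLAIM (what is proved, stated in full; the proofs are below) =====
def Claim_equal_add_text_keys : Prop :=
  ∀ (paragraph : List (String × String)), Dom_add_text_keys paragraph →
    Pre_add_text_keys paragraph → Spec_add_text_keys paragraph (add_text_keys paragraph)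

-- ===== LEMMAS AND PROOFS =====

-- ===== helper definitions for the proofs =====
def pvLangs (P : List (String × String)) : List (String × String) :=
  TEXT_KEYS.map (fun lk => (lk, (PySem.Dict.mk P).getD lk ""))

def pvFiltered (P : List (String × String)) : List (String × String) :=
  P.filter (fun kv => !TEXT_KEYS.contains kv.1)

-- the common value of both ports when "text" is a key
def pvCanon (P : List (String × String)) : List (String × String) :=
  (pvFiltered P).flatMap (fun kv => if kv.1 = "text" then kv :: pvLangs P else [kv])

lemma pv_foldl_skip {β : Type} (p : String × String → Bool) (f : β → String × String → β)
    (l : List (String × String)) (init : β) :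
    l.foldl (fun x y => if p y then x else f x y) init
      = (l.filter (fun y => !p y)).foldl f init := by
  rw [List.foldl_filter]
  congr 1
  funext x y
  cases h : p y <;> simp [h]

lemma pv_foldl_fixed {α β : Type} (f : β → α → β) :
    ∀ (l : List α) (d : β), (∀ a ∈ l, f d a = d) → l.foldl f d = d := by
  intro l
  induction l with
  | nil => intro d _; rfl
  | cons a rest ih =>
    intro d h
    rw [List.foldl_cons, h a (by simp)]
    exact ih d (fun b hb => h b (by simp [hb]))

lemma pv_flatMap_congr {α β : Type} (f g : α → List β) :
    ∀ (l : List α), (∀ a ∈ l, f a = g a) → l.flatMap f = l.flatMap g := by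
  intro l
  induction l with
  | nil => intro _; rfl
  | cons a rest ih =>
    intro h
    simp only [List.flatMap_cons, h a (by simp), ih (fun b hb => h b (by simp [hb]))]

lemma pv_contains_false {d : PySem.Dict String String} {k : String}
    (h : k ∉ d.keys) : d.contains k = false := by
  cases hc : d.contains k
  · rfl
  · exact absurd ((PySem.Dict.contains_iff_mem_keys d k).1 hc) h

lemma pv_items_interleave {α γ : Type} (key val : α → String)
    (ekey evalf : γ → String) (ext : List γ) :
    ∀ (l : List α) (d : PySem.Dict String String),
      (d.keys ++ l.map key).Nodup →
      (ext.map ekey).Nodup →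
      (∀ x ∈ ext.map ekey, x ∉ l.map key) →
      ("text" ∈ l.map key → ∀ x ∈ ext.map ekey, x ∉ d.keys) →
      "text" ∉ ext.map ekey →
      (l.foldl (fun f a =>
          let f1 := f.insert (key a) (val a)
          if key a = "text" then ext.foldl (fun f2 e => f2.insert (ekey e) (evalf e)) f1 else f1)
        d).items
        = d.items ++ l.flatMap (fun a =>
            if key a = "text" then (key a, val a) :: ext.map (fun e => (ekey e, evalf e))
            else [(key a, val a)]) := by
  intro l
  induction l with
  | nil => intro d _ _ _ _ _; simp
  | cons a rest ih =>
    intro d h1 h2 h3 h4 h5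
    have hnd := List.nodup_append.mp h1
    have hd : d.keys.Nodup := hnd.1
    have haR := hnd.2.1
    rw [List.map_cons, List.nodup_cons] at haR
    have hKa : key a ∉ rest.map key := haR.1
    have hR : (rest.map key).Nodup := haR.2
    have hdisj := hnd.2.2
    have hka : key a ∉ d.keys := fun hm => hdisj (key a) hm (key a) (by simp) rfl
    have hins : (d.insert (key a) (val a)).items = d.items ++ [(key a, val a)] :=
      PySem.Dict.items_insert_of_not_contains d _ (pv_contains_false hka)
    have hkeys1 : (d.insert (key a) (val a)).keys = d.keys ++ [key a] := by
      simp [PySem.Dict.keys, hins]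
    rw [List.foldl_cons]
    by_cases hA : key a = "text"
    · have htext : "text" ∈ (a :: rest).map key := by
        rw [List.map_cons]; exact hA ▸ List.mem_cons_self
      have hkaE : key a ∉ ext.map ekey := fun hm => h5 (hA ▸ hm)
      have hfresh : ∀ e ∈ ext, (d.insert (key a) (val a)).contains (ekey e) = false := by
        intro e he
        apply pv_contains_false
        rw [hkeys1]
        simp only [List.mem_append, List.mem_singleton]
        rintro (hdm | hk)
        · exact h4 htext _ (List.mem_map_of_mem he) hdm
        · exact hkaE (hk ▸ List.mem_map_of_mem he)
      have hstep : (let f1 := d.insert (key a) (val a);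
          if key a = "text" then ext.foldl (fun f2 e => f2.insert (ekey e) (evalf e)) f1 else f1)
          = ext.foldl (fun f2 e => f2.insert (ekey e) (evalf e)) (d.insert (key a) (val a)) := by
        simp only [if_pos hA]
      rw [hstep]
      set d2 := ext.foldl (fun f2 e => f2.insert (ekey e) (evalf e)) (d.insert (key a) (val a)) with hd2
      have hd2items : d2.items = d.items ++ [(key a, val a)] ++ ext.map (fun e => (ekey e, evalf e)) := by
        rw [hd2, PySem.Dict.items_foldl_insert_fresh ext ekey evalf _ hfresh h2, hins]
      have hd2keys : d2.keys = d.keys ++ [key a] ++ ext.map ekey := by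
        simp [PySem.Dict.keys, hd2items, Function.comp]
      have hnotext : "text" ∉ rest.map key := hA ▸ hKa
      have hER : (ext.map ekey ++ rest.map key).Nodup := by
        rw [List.nodup_append]
        refine ⟨h2, hR, ?_⟩
        intro x hx b hb heq
        exact h3 x hx (heq ▸ List.mem_cons_of_mem _ hb)
      have h1' : (d2.keys ++ rest.map key).Nodup := by
        rw [hd2keys, List.append_assoc, List.append_assoc, List.nodup_append]
        refine ⟨hd, ?_, ?_⟩
        · rw [List.nodup_append]
          refine ⟨List.nodup_singleton _, hER, ?_⟩
          intro x hx b hb heq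
          simp only [List.mem_singleton] at hx
          subst hx
          rcases List.mem_append.mp hb with hk | hk
          · exact hkaE (heq ▸ hk)
          · exact hKa (heq ▸ hk)
        · intro x hx b hb heq
          subst heq
          rcases List.mem_append.mp hb with hk | hk
          · simp only [List.mem_singleton] at hk
            exact hdisj x hx x (by rw [hk, List.map_cons]; exact List.mem_cons_self) rfl
          · rcases List.mem_append.mp hk with hk | hk
            · exact h4 htext x hk hx
            · exact hdisj x hx x (by rw [List.map_cons]; exact List.mem_cons_of_mem _ hk) rfl
      rw [ih d2 h1' h2 (fun x hx hm => h3 x hx (List.mem_cons_of_mem _ hm))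
        (fun ht => absurd ht hnotext) h5]
      rw [hd2items, List.flatMap_cons, if_pos hA]
      simp [List.append_assoc]
    · have hstep : (let f1 := d.insert (key a) (val a);
          if key a = "text" then ext.foldl (fun f2 e => f2.insert (ekey e) (evalf e)) f1 else f1)
          = d.insert (key a) (val a) := by
        simp only [if_neg hA]
      rw [hstep]
      have h1' : ((d.insert (key a) (val a)).keys ++ rest.map key).Nodup := by
        rw [hkeys1, List.append_assoc]
        simpa [List.singleton_append] using h1
      have h4' : "text" ∈ rest.map key → ∀ x ∈ ext.map ekey, x ∉ (d.insert (key a) (val a)).keys := by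
        intro ht x hx hm
        rw [hkeys1] at hm
        rcases List.mem_append.mp hm with hdm | hk
        · exact h4 (List.mem_cons_of_mem _ ht) x hx hdm
        · simp only [List.mem_singleton] at hk
          exact h3 x hx (hk ▸ List.mem_cons_self)
      rw [ih _ h1' h2 (fun x hx hm => h3 x hx (List.mem_cons_of_mem _ hm)) h4' h5]
      rw [hins, List.flatMap_cons, if_neg hA]
      simp [List.append_assoc]


lemma pv_filtered_nodup {P : List (String × String)} (hPre : (P.map Prod.fst).Nodup) :
    ((pvFiltered P).map Prod.fst).Nodup :=
  hPre.sublist (List.Sublist.map Prod.fst List.filter_sublist)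

lemma pv_filtered_disj {P : List (String × String)} :
    ∀ x ∈ (pvFiltered P).map Prod.fst, x ∉ TEXT_KEYS := by
  intro x hx hmem
  rcases List.mem_map.mp hx with ⟨kv, hkv, hfst⟩
  have hnc := List.of_mem_filter hkv
  rw [hfst] at hnc
  rw [← List.contains_iff_mem] at hmem
  rw [hmem] at hnc
  exact Bool.noConfusion hnc

lemma pvFiltered_eq (P : List (String × String)) :
    List.filter (fun y => !TEXT_KEYS.contains y.1) P = pvFiltered P := rfl

lemma pv_items_empty : (PySem.Dict.empty : PySem.Dict String String).items = [] := rfl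

lemma pv_keys_empty : (PySem.Dict.empty : PySem.Dict String String).keys = [] := rfl

lemma pv_new_para_items {P : List (String × String)} (hPre : (P.map Prod.fst).Nodup) :
    (P.foldl (fun d kv => if TEXT_KEYS.contains kv.1 then d else d.insert kv.1 kv.2)
      (PySem.Dict.empty : PySem.Dict String String)).items = pvFiltered P := by
  rw [pv_foldl_skip (β := PySem.Dict String String) (fun kv => TEXT_KEYS.contains kv.1)
    (fun d kv => d.insert kv.1 kv.2)]
  rw [pvFiltered_eq]
  rw [PySem.Dict.items_foldl_insert_fresh (pvFiltered P) Prod.fst Prod.snd PySem.Dict.empty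
    (fun kv _ => by simp) (pv_filtered_nodup hPre)]
  simp [pv_items_empty]

lemma pv_text_mem_filtered {P : List (String × String)}
    (hT : "text" ∈ P.map Prod.fst) : "text" ∈ (pvFiltered P).map Prod.fst := by
  rcases List.mem_map.mp hT with ⟨kv, hkv, hfst⟩
  exact List.mem_map.mpr ⟨kv, List.mem_filter.mpr ⟨hkv, by rw [hfst]; decide⟩, hfst⟩

-- A = canonical form when "text" is a key
lemma pv_A_canon {P : List (String × String)} (hPre : (P.map Prod.fst).Nodup)
    (hT : "text" ∈ P.map Prod.fst) : add_text_keys P = pvCanon P := by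
  have hc : (P.map Prod.fst).contains "text" = true := List.contains_iff_mem.mpr hT
  have hnp := pv_new_para_items hPre
  have hFnd := pv_filtered_nodup hPre
  have hkeysA : (P.foldl (fun d kv => if TEXT_KEYS.contains kv.1 then d else d.insert kv.1 kv.2)
      (PySem.Dict.empty : PySem.Dict String String)).keys = (pvFiltered P).map Prod.fst := by
    simp only [PySem.Dict.keys, hnp]
  have htF := pv_text_mem_filtered hT
  have hc2 : ((pvFiltered P).map Prod.fst).contains "text" = true := List.contains_iff_mem.mpr htF
  have hnp2 : (TEXT_KEYS.foldl (fun d lk => d.insert lk ((PySem.Dict.mk P).getD lk ""))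
      (P.foldl (fun d kv => if TEXT_KEYS.contains kv.1 then d else d.insert kv.1 kv.2)
        (PySem.Dict.empty : PySem.Dict String String))).items
      = pvFiltered P ++ pvLangs P := by
    rw [PySem.Dict.items_foldl_insert_fresh TEXT_KEYS (fun lk => lk)
      (fun lk => (PySem.Dict.mk P).getD lk "") _
      (fun lk hlk => pv_contains_false (by rw [hkeysA]; exact fun hm => pv_filtered_disj _ hm hlk))
      (by decide)]
    rw [hnp]
    simp [pvLangs]
  set np2 := TEXT_KEYS.foldl (fun d lk => d.insert lk ((PySem.Dict.mk P).getD lk ""))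
      (P.foldl (fun d kv => if TEXT_KEYS.contains kv.1 then d else d.insert kv.1 kv.2)
        (PySem.Dict.empty : PySem.Dict String String)) with hnp2def
  have hnp2keys : np2.keys = (pvFiltered P).map Prod.fst ++ TEXT_KEYS := by
    simp only [PySem.Dict.keys, hnp2, pvLangs, List.map_append, List.map_map]
    rfl
  have hnp2nd : np2.keys.Nodup := by
    rw [hnp2keys, List.nodup_append]
    exact ⟨hFnd, by decide, fun x hx b hb heq => pv_filtered_disj x hx (heq ▸ hb)⟩
  have hgF : ∀ kv ∈ pvFiltered P, np2.getD kv.1 "" = kv.2 := by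
    intro kv hkv
    exact PySem.Dict.getD_of_mem_items np2
      (by rw [hnp2]; exact List.mem_append_left _ (by simpa using hkv)) hnp2nd ""
  have hgT : ∀ lk ∈ TEXT_KEYS, np2.getD lk "" = (PySem.Dict.mk P).getD lk "" := by
    intro lk hlk
    exact PySem.Dict.getD_of_mem_items np2
      (by rw [hnp2]; exact List.mem_append_right _ (List.mem_map_of_mem hlk)) hnp2nd ""
  have hfin0 : (((pvFiltered P).map Prod.fst).foldl (fun f k =>
        let f1 := f.insert k (np2.getD k "")
        if k = "text" then TEXT_KEYS.foldl (fun f2 lk => f2.insert lk (np2.getD lk "")) f1 else f1)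
        (PySem.Dict.empty : PySem.Dict String String)).items = pvCanon P := by
    rw [pv_items_interleave (fun k => k) (fun k => np2.getD k "") (fun lk => lk)
      (fun lk => np2.getD lk "") TEXT_KEYS ((pvFiltered P).map Prod.fst)
      PySem.Dict.empty
      (by simp only [pv_keys_empty, List.nil_append, List.map_id']; exact hFnd)
      (by decide)
      (by simp only [List.map_id']; exact fun x hx hm => pv_filtered_disj x hm hx)
      (by simp [pv_keys_empty])
      (by decide)]
    simp only [pv_items_empty, List.nil_append, List.map_id', List.flatMap_map]
    unfold pvCanon
    apply pv_flatMap_congr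
    intro kv hkv
    by_cases h : kv.1 = "text"
    · rw [if_pos h, if_pos h, hgF kv hkv]
      congr 1
      exact List.map_congr_left (fun lk hlk => by rw [hgT lk hlk])
    · rw [if_neg h, if_neg h, hgF kv hkv]
  set fin0 := (((pvFiltered P).map Prod.fst).foldl (fun f k =>
        let f1 := f.insert k (np2.getD k "")
        if k = "text" then TEXT_KEYS.foldl (fun f2 lk => f2.insert lk (np2.getD lk "")) f1 else f1)
        (PySem.Dict.empty : PySem.Dict String String)) with hfin0def
  have hfin0keys : ∀ lk ∈ TEXT_KEYS, lk ∈ fin0.keys := by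
    intro lk hlk
    rcases List.mem_map.mp htF with ⟨kvt, hkvt, hfst⟩
    have hmem : lk ∈ (pvCanon P).map Prod.fst := by
      unfold pvCanon
      rw [List.map_flatMap]
      refine List.mem_flatMap.mpr ⟨kvt, hkvt, ?_⟩
      rw [if_pos hfst, List.map_cons]
      refine List.mem_cons_of_mem _ ?_
      simpa [pvLangs, List.map_map, Function.comp] using hlk
    show lk ∈ fin0.items.map Prod.fst
    rw [hfin0]
    exact hmem
  have hfin1 : np2.keys.foldl (fun f k =>
        if !f.contains k && !((pvFiltered P).map Prod.fst).contains k
        then f.insert k (np2.getD k "") else f) fin0 = fin0 := by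
    apply pv_foldl_fixed
    intro k hk
    rw [hnp2keys] at hk
    rcases List.mem_append.mp hk with hkF | hkT
    · have hck : ((pvFiltered P).map Prod.fst).contains k = true := List.contains_iff_mem.mpr hkF
      have hcond : (!fin0.contains k && !((pvFiltered P).map Prod.fst).contains k) = false := by
        rw [hck]; simp
      rw [hcond, if_neg Bool.false_ne_true]
    · have hck : fin0.contains k = true :=
        (PySem.Dict.contains_iff_mem_keys fin0 k).mpr (hfin0keys k hkT)
      rw [if_neg (by simp [hck])]
  rw [add_text_keys]
  rw [if_neg (show ¬((!(P.map Prod.fst).contains "text") = true) by rw [hc]; simp)]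
  simp only [hkeysA]
  rw [hc2, if_pos rfl]
  rw [← hnp2def, ← hfin0def, hfin1]
  exact hfin0

-- B = canonical form when "text" is a key
lemma pv_B_canon {P : List (String × String)} (hPre : (P.map Prod.fst).Nodup)
    (hT : "text" ∈ P.map Prod.fst) : add_text_keys_alt P = pvCanon P := by
  have hc : (P.map Prod.fst).contains "text" = true := List.contains_iff_mem.mpr hT
  rw [add_text_keys_alt]
  rw [if_neg (show ¬((!(P.map Prod.fst).contains "text") = true) by rw [hc]; simp)]
  rw [pv_foldl_skip (β := PySem.Dict String String) (fun kv => TEXT_KEYS.contains kv.1) (fun r kv =>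
      let r1 := r.insert kv.1 kv.2
      if kv.1 = "text" then
        TEXT_KEYS.foldl (fun r2 lk => r2.insert lk ((PySem.Dict.mk P).getD lk "")) r1
      else r1)]
  rw [pvFiltered_eq]
  rw [pv_items_interleave Prod.fst Prod.snd (fun lk => lk)
    (fun lk => (PySem.Dict.mk P).getD lk "") TEXT_KEYS (pvFiltered P)
    PySem.Dict.empty
    (by simp only [pv_keys_empty, List.nil_append]; exact pv_filtered_nodup hPre)
    (by decide)
    (by simp only [List.map_id']; exact fun x hx hm => pv_filtered_disj x hm hx)
    (by simp [pv_keys_empty])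
    (by decide)]
  simp only [pv_items_empty, List.nil_append]
  unfold pvCanon
  apply pv_flatMap_congr
  intro kv _
  by_cases h : kv.1 = "text"
  · rw [if_pos h, if_pos h]
    rfl
  · rw [if_neg h, if_neg h]

-- ===== VERDICT (by name: the statement is the Claim_ definition above) =====
theorem add_text_keys_spec : Claim_equal_add_text_keys := by
  intro P _ hPre
  unfold Spec_add_text_keys
  by_cases hT : "text" ∈ P.map Prod.fst
  · rw [pv_A_canon hPre hT, pv_B_canon hPre hT]
  · have hc : (P.map Prod.fst).contains "text" = false := by
      cases h : (P.map Prod.fst).contains "text"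
      · rfl
      · exact absurd (List.contains_iff_mem.mp h) hT
    rw [add_text_keys, add_text_keys_alt,
      if_pos (show (!(P.map Prod.fst).contains "text") = true by rw [hc]; rfl),
      if_pos (show (!(P.map Prod.fst).contains "text") = true by rw [hc]; rfl)]
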